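-- pv_equiv track=rewrite | github.com/sinaayy/AES128 | src/tools.py | StrToHex32
-- ===== SOURCE A (Python) =====
-- def StrToHex32(word):
--
--     """
--     Conversion d'une chaîne de caractères en un entier équivalent à un hexadécimal contenant 32 bits.
--
--     Entrée : String
--     Sortie : Int
--
--     La fonction prend des caractères 1 par 1 afin de créer 1 byte, puis ajoute l'équivalent en entier dans la variable de retour.
--     S'il n'y a pas assez de caractère pour former un entier de cette forme, les bytes restants sont égaux au caractère '0'.
--
--     Exemple : "abc" -> 0xa0b0c00000000000000000000000000 (sous forme hexadécimal)
--     """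
--
--     if len(word) > 16:
--         raise ValueError("La taille du mot est trop grand, seulement un string de taille 16.")
--
--     hexaWord = 0
--     lword = len(word)
--     for i in range(lword):
--         hexaWord = hexaWord << 8 | int(word[i], 16)
--
--     for _ in range(16-lword):
--         hexaWord = hexaWord << 8 | 0x00
--
--     return hexaWord
-- ===== SOURCE B (Python) =====
-- def StrToHex32(word):
--     if len(word) > 16:
--         raise ValueError("La taille du mot est trop grand, seulement un string de taille 16.")
--     return int(''.join('0%x' % int(c, 16) for c in word).ljust(32, '0'), 16)
-- ===== Notes on version B (the rewrite author's own statement) =====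
-- stated objective: idiomatic
-- what changed: Replaces the two shift-and-or accumulation loops by building the 32-digit hex string ('0'+hex nibble per char, left-justified with '0') and parsing it once with int(.,16); per-char validation via int(c,16) is kept.
import Mathlib
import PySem

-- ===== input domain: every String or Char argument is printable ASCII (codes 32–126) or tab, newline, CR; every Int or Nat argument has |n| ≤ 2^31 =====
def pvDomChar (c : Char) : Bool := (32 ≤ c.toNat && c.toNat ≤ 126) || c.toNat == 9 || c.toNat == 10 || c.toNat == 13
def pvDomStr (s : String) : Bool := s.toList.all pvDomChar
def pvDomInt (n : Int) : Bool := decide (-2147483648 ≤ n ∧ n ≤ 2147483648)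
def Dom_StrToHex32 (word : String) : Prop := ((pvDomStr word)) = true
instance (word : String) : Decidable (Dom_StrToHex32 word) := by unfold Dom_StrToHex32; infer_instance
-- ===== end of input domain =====

-- B replaces A's two shift-and-or loops by building the padded 32-digit hex string and parsing it once (more idiomatic).


-- ===== PORT A =====
-- value of int(c, 16) for a single hex-digit character (junk 0 outside Pre_, where Python raises)
def hexVal (c : Char) : Int :=
  if '0' ≤ c ∧ c ≤ '9' then (c.toNat : Int) - 48
  else if 'a' ≤ c ∧ c ≤ 'f' then (c.toNat : Int) - 87
  else if 'A' ≤ c ∧ c ≤ 'F' then (c.toNat : Int) - 55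
  else 0

-- A's code; 'hexaWord << 8 | v' is written 'hexaWord * 256 + v', exact here since
-- hexaWord ≥ 0 and 0 ≤ v < 256; 'for i in range(lword): … word[i] …' iterates the chars in order.
def StrToHex32 (word : String) : Int :=
  let lword := word.toList.length
  let h := word.toList.foldl (fun hexaWord c => hexaWord * 256 + hexVal c) 0
  (List.range (16 - lword)).foldl (fun hexaWord _ => hexaWord * 256 + 0) h

-- ===== PORT B =====
-- value of int(c, 16) for a single hex-digit character (B's own copy; junk 0 where Python raises)
def hexValB (c : Char) : Int :=
  if '0' ≤ c ∧ c ≤ '9' then (c.toNat : Int) - 48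
  else if 'a' ≤ c ∧ c ≤ 'f' then (c.toNat : Int) - 87
  else if 'A' ≤ c ∧ c ≤ 'F' then (c.toNat : Int) - 55
  else 0

-- the character '%x' % v for a nibble v
def hexChar (v : Int) : Char :=
  if v < 10 then Char.ofNat (48 + v.toNat) else Char.ofNat (87 + v.toNat)

-- Source B: build ''.join('0%x' % int(c,16) for c in word), left-justify to 32 with '0', parse base 16
def StrToHex32_alt (word : String) : Int :=
  let digits := word.toList.flatMap (fun c => ['0', hexChar (hexValB c)])
  let padded := digits ++ List.replicate (32 - digits.length) '0'
  padded.foldl (fun acc c => acc * 16 + hexValB c) 0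

-- ===== PRECONDITION & SPEC =====
def isHexChar (c : Char) : Bool :=
  ('0' ≤ c && c ≤ '9') || ('a' ≤ c && c ≤ 'f') || ('A' ≤ c && c ≤ 'F')

-- exactly the inputs on which Python's A returns: at most 16 characters (else the explicit raise),
-- all of them hex digits (else int(c, 16) raises ValueError)
def Pre_StrToHex32 (word : String) : Prop :=
  word.toList.length ≤ 16 ∧ word.toList.all isHexChar = true
instance (word : String) : Decidable (Pre_StrToHex32 word) := by unfold Pre_StrToHex32; infer_instance

def pvWitness_StrToHex32 : String := "abc"

def Spec_StrToHex32 (word : String) (out : Int) : Prop := out = StrToHex32_alt word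
instance (word : String) (out : Int) : Decidable (Spec_StrToHex32 word out) := by unfold Spec_StrToHex32; infer_instance

-- ===== CLAIM (what is proved, stated in full; the proofs are below) =====
def Claim_equal_StrToHex32 : Prop := ∀ (word : String), Dom_StrToHex32 word → Pre_StrToHex32 word → Spec_StrToHex32 word (StrToHex32 word)

-- ===== LEMMAS AND PROOFS =====

lemma hexValB_eq (c : Char) : hexValB c = hexVal c := rfl

lemma hexVal_range (c : Char) : 0 ≤ hexVal c ∧ hexVal c ≤ 15 := by
  unfold hexVal
  split_ifs with h1 h2 h3 <;>
    simp only [Char.le_def, UInt32.le_iff_toNat_le, Char.toNat] at * <;>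
    simp only [show '0'.val.toNat = 48 from rfl, show '9'.val.toNat = 57 from rfl,
      show 'a'.val.toNat = 97 from rfl, show 'f'.val.toNat = 102 from rfl,
      show 'A'.val.toNat = 65 from rfl, show 'F'.val.toNat = 70 from rfl] at * <;> omega

lemma hexVal_hexChar (v : Int) (h0 : 0 ≤ v) (h15 : v ≤ 15) :
    hexVal (hexChar v) = v := by
  interval_cases v <;> decide

lemma hexVal_roundtrip (c : Char) : hexVal (hexChar (hexVal c)) = hexVal c :=
  hexVal_hexChar _ (hexVal_range c).1 (hexVal_range c).2

-- folding base 16 over the doubled digits '0', hex(c) equals folding base 256 over the chars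
lemma hexVal_zero : hexVal '0' = 0 := by decide

lemma fold_flat (l : List Char) (a : Int) :
    List.foldl (fun acc c => acc * 16 + hexVal c) a
      (l.flatMap (fun c => ['0', hexChar (hexVal c)]))
    = List.foldl (fun acc c => acc * 256 + hexVal c) a l := by
  induction l generalizing a with
  | nil => rfl
  | cons c l ih =>
      simp only [List.flatMap_cons, List.cons_append, List.nil_append, List.foldl_cons,
        hexVal_roundtrip, hexVal_zero]
      rw [show (a * 16 + 0) * 16 + hexVal c = a * 256 + hexVal c by ring, ih]

-- folding the k padding zeros multiplies by 16^k
lemma fold_pad (k : ℕ) (a : Int) :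
    List.foldl (fun acc c => acc * 16 + hexVal c) a (List.replicate k '0')
    = a * 16 ^ k := by
  induction k generalizing a with
  | zero => simp
  | succ k ih =>
      rw [List.replicate_succ, List.foldl_cons, hexVal_zero, ih]
      ring

-- A's second loop multiplies by 256^m
lemma fold_range (m : ℕ) (h : Int) :
    List.foldl (fun acc _ => acc * 256 + 0) h (List.range m) = h * 256 ^ m := by
  induction m with
  | zero => simp
  | succ m ih =>
      rw [List.range_succ, List.foldl_append, ih, List.foldl_cons, List.foldl_nil]
      ring

theorem StrToHex32_spec : Claim_equal_StrToHex32 := by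
  intro word _ hpre
  unfold Spec_StrToHex32 StrToHex32 StrToHex32_alt
  simp only [hexValB_eq]
  obtain ⟨hlen, -⟩ := hpre
  rw [List.foldl_append, fold_flat, fold_pad, fold_range]
  have hdig : (word.toList.flatMap (fun c => ['0', hexChar (hexVal c)])).length
      = 2 * word.toList.length := by
    simp [List.length_flatMap, Nat.mul_comm]
  rw [hdig]
  have : (16 : Int) ^ (32 - 2 * word.toList.length) = 256 ^ (16 - word.toList.length) := by
    have h2 : 32 - 2 * word.toList.length = 2 * (16 - word.toList.length) := by omega
    rw [h2, pow_mul]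
    norm_num
  rw [this]
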